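-- pv_equiv track=rewrite | github.com/Forcepoint/fp-bd-casb-aws-securityhub | src/modules/asff_utils.py | create_dict_of_key_values_object
-- ===== SOURCE A (Python) =====
-- def is_valid_entry(entries_dict, entry_key):
--     if entries_dict.get(entry_key):
--         if entries_dict.get(entry_key).strip('"'):
--             return True
--     return False
--
-- def create_dict_of_key_values_object(
--     user_defined_result_dct, fields_lst, data_source_dct
-- ):
--     if fields_lst:
--         field = fields_lst[0]
--         if is_valid_entry(data_source_dct, field):
--             user_defined_result_dct[field] = data_source_dct.get(field).strip('"')[
--                 :1024
--             ]
--         modified_fields_lst = fields_lst.copy()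
--         modified_fields_lst.remove(field)
--         create_dict_of_key_values_object(
--             user_defined_result_dct, modified_fields_lst, data_source_dct
--         )
--     return user_defined_result_dct
-- ===== SOURCE B (Python) =====
-- def create_dict_of_key_values_object(
--     user_defined_result_dct, fields_lst, data_source_dct
-- ):
--     for field in fields_lst:
--         value = data_source_dct.get(field)
--         if value:
--             stripped = value.strip('"')
--             if stripped:
--                 user_defined_result_dct[field] = stripped[:1024]
--     return user_defined_result_dct
-- ===== Notes on version B (the rewrite author's own statement) =====
-- stated objective: faster
-- what changed: Replaces A's recursion that copies the field list and removes its head on every step (quadratic list copying, two dict lookups and two strips per field) with a single for-loop over fields_lst doing one lookup and one strip per field.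
import Mathlib
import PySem

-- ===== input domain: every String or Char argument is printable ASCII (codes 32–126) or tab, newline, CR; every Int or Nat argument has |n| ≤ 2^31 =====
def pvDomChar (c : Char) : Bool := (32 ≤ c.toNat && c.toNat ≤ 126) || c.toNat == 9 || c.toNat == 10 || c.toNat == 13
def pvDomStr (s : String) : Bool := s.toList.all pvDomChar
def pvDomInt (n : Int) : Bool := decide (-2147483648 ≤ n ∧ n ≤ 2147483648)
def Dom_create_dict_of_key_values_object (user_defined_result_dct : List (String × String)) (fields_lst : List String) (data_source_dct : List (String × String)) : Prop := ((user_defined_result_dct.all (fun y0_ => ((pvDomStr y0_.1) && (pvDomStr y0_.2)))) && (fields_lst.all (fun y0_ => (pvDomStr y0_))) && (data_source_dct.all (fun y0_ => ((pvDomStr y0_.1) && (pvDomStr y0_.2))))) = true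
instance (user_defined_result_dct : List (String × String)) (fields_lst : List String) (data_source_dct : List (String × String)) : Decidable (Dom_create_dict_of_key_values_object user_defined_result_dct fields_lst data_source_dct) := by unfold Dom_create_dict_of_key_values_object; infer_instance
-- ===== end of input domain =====

-- ===== PORT A =====
-- Note: the Python A mutates user_defined_result_dct in place; equivalence here is about the return value.
-- is_valid_entry: truthy get() result whose strip('\"') is truthy
def is_valid_entry (entries_dict : PySem.Dict String String) (entry_key : String) : Bool :=
  match entries_dict.get? entry_key with
  | some v =>
      if v ≠ "" then
        (if PySem.Str.stripChars v "\"" ≠ "" then true else false)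
      else false
  | none => false

-- the recursion of A: head field, conditional insert, recurse on the list with the head removed
def createGoA (user_defined_result_dct : PySem.Dict String String) (fields_lst : List String)
    (data_source_dct : PySem.Dict String String) : PySem.Dict String String :=
  match fields_lst with
  | [] => user_defined_result_dct
  | field :: rest =>
      let u' :=
        if is_valid_entry data_source_dct field then
          user_defined_result_dct.insert field
            (PySem.Str.slice (PySem.Str.stripChars ((data_source_dct.get? field).getD "") "\"") none (some 1024))
        else user_defined_result_dct
      -- modified_fields_lst = fields_lst.copy(); modified_fields_lst.remove(field)
      let modified_fields_lst := (PySem.List.remove? (field :: rest) field).getD rest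
      createGoA u' modified_fields_lst data_source_dct

def create_dict_of_key_values_object (user_defined_result_dct : List (String × String)) (fields_lst : List String) (data_source_dct : List (String × String)) : List (String × String) :=
  (createGoA (PySem.Dict.mk user_defined_result_dct) fields_lst (PySem.Dict.mk data_source_dct)).items

-- ===== PORT B =====
-- B: one left-to-right fold over fields_lst, a single get() per field, inline validity test.
def create_dict_of_key_values_object_alt (user_defined_result_dct : List (String × String)) (fields_lst : List String) (data_source_dct : List (String × String)) : List (String × String) :=
  (fields_lst.foldl (fun acc field =>
      match (PySem.Dict.mk data_source_dct).get? field with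
      | none => acc
      | some value =>
          if value = "" then acc
          else
            let stripped := PySem.Str.stripChars value "\""
            if stripped = "" then acc
            else acc.insert field (PySem.Str.slice stripped none (some 1024)))
    (PySem.Dict.mk user_defined_result_dct)).items

-- ===== PRECONDITION & SPEC =====
def Spec_create_dict_of_key_values_object (user_defined_result_dct : List (String × String)) (fields_lst : List String) (data_source_dct : List (String × String)) (out : List (String × String)) : Prop := out = create_dict_of_key_values_object_alt user_defined_result_dct fields_lst data_source_dct
instance (user_defined_result_dct : List (String × String)) (fields_lst : List String) (data_source_dct : List (String × String)) (out : List (String × String)) : Decidable (Spec_create_dict_of_key_values_object user_defined_result_dct fields_lst data_source_dct out) := by unfold Spec_create_dict_of_key_values_object; infer_instance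

-- ===== CLAIM (what is proved, stated in full; the proofs are below) =====
def Claim_equal_create_dict_of_key_values_object : Prop := ∀ (user_defined_result_dct : List (String × String)) (fields_lst : List String) (data_source_dct : List (String × String)), Dom_create_dict_of_key_values_object user_defined_result_dct fields_lst data_source_dct → Spec_create_dict_of_key_values_object user_defined_result_dct fields_lst data_source_dct (create_dict_of_key_values_object user_defined_result_dct fields_lst data_source_dct)

-- ===== LEMMAS AND PROOFS =====

-- ===== VERDICT (by name: the statement is the Claim_ definition above) =====
lemma createGoA_eq_foldl (fields : List String) (u d : PySem.Dict String String) :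
    createGoA u fields d = fields.foldl (fun acc field =>
      match d.get? field with
      | none => acc
      | some value =>
          if value = "" then acc
          else
            let stripped := PySem.Str.stripChars value "\""
            if stripped = "" then acc
            else acc.insert field (PySem.Str.slice stripped none (some 1024))) u := by
  induction fields generalizing u with
  | nil => simp [createGoA]
  | cons f rest ih =>
      rw [createGoA]
      simp only [PySem.List.remove?_cons_self, Option.getD_some, List.foldl_cons, ih]
      congr 1
      unfold is_valid_entry
      cases h : d.get? f with
      | none => simp
      | some v =>
          by_cases hv : v = "" <;> simp [hv]

theorem create_dict_of_key_values_object_spec : Claim_equal_create_dict_of_key_values_object := by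
  intro u f d _
  unfold Spec_create_dict_of_key_values_object create_dict_of_key_values_object create_dict_of_key_values_object_alt
  rw [createGoA_eq_foldl]
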